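-- pv_equiv track=rewrite | github.com/stayt1/result | RankGuess-Code/Targeted/utils.py | account_transform
-- ===== SOURCE A (Python) =====
-- from enum import Enum
--
-- class TokenType(Enum):
--     DIGIT = 1
--     LETTER = 2
--     OTHER = 3
--
-- def get_type(c):
--     if c.isdigit():
--         return TokenType.DIGIT
--     if c.isalpha():
--         return TokenType.LETTER
--     return TokenType.OTHER
--
-- def account_transform(account):
--     returns = []
--     if account == "":
--         return returns
--     account_start = 4000
--     account_letter_start = 4100
--     account_digit_start = 4200
--     returns.append((account, account_start))
--     account_start += 1
--
--     last_type = get_type(account[0])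
--     last_pos = 0
--
--     for i in range(1, len(account)):
--         current_type = get_type(account[i])
--         if last_type != current_type:
--             returns.append((account[last_pos:i], account_start))
--             account_start += 1
--             if last_type == TokenType.DIGIT:
--                 returns.append((account[last_pos:i], account_digit_start))
--                 account_digit_start += 1
--             elif last_type == TokenType.LETTER:
--                 returns.append((account[last_pos:i], account_letter_start))
--                 account_letter_start += 1
--             last_pos = i
--             last_type = current_type
--
--     if last_pos != 0:
--         returns.append((account[last_pos:], account_start))
--         account_start += 1
--         if last_type == TokenType.DIGIT:
--             returns.append((account[last_pos:], account_digit_start))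
--             account_digit_start += 1
--         elif last_type == TokenType.LETTER:
--             returns.append((account[last_pos:], account_letter_start))
--             account_letter_start += 1
--     return returns
-- ===== SOURCE B (Python) =====
-- # B: two-phase decomposition — first split the account into consecutive same-type
-- # runs, then emit all indexed entries in a single loop over the runs.
--
-- def _typ(c):
--     if c.isdigit():
--         return 1
--     if c.isalpha():
--         return 2
--     return 3
--
-- def account_transform(account):
--     if account == "":
--         return []
--     # phase 1: split into maximal runs of equal type
--     n = len(account)
--     runs = []
--     i = 0
--     while i < n:
--         t = _typ(account[i])
--         run = [account[i]]
--         i += 1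
--         while i < n and _typ(account[i]) == t:
--             run.append(account[i])
--             i += 1
--         runs.append(("".join(run), t))
--     # phase 2: emit
--     out = [(account, 4000)]
--     if len(runs) > 1:
--         s, l, d = 4001, 4100, 4200
--         for text, t in runs:
--             out.append((text, s))
--             s += 1
--             if t == 1:
--                 out.append((text, d))
--                 d += 1
--             elif t == 2:
--                 out.append((text, l))
--                 l += 1
--     return out
-- ===== Notes on version B (the rewrite author's own statement) =====
-- stated objective: alternative
-- what changed: B replaces A's single index loop with last_pos/last_type bookkeeping and delayed boundary slicing by a two-phase decomposition: first split the string into maximal same-type runs, then emit all entries in one plain loop over the runs (only when there are two or more runs); same cost, clearer separation of grouping from emission.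
import Mathlib
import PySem

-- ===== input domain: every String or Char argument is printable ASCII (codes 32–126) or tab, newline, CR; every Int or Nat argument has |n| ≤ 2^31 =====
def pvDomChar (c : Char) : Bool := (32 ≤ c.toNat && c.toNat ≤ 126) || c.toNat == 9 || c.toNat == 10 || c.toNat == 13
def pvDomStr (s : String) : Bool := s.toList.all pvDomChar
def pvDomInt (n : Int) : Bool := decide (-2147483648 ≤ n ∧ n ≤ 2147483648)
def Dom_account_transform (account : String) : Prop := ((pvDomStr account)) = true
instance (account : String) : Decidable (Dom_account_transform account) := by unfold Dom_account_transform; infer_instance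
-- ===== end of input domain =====

-- B replaces A's index loop with last_pos/last_type bookkeeping by a two-phase
-- decomposition (split into same-type runs, then emit over the runs); same values, proved equal.

-- token type shared by both programs (A's TokenType enum / B's _typ classification)
inductive PyTok | digit | letter | other
deriving DecidableEq, Repr

-- get_type / _typ: both Pythons classify a char by isdigit / isalpha
def pvGetType (c : Char) : PyTok :=
  if PySem.Chars.isdigit c then .digit
  else if PySem.Chars.isalpha c then .letter
  else .other

-- ===== PORT A =====
-- the for-loop of A: state (returns, account_start, letter_start, digit_start, last_type, last_pos);
-- account[last_pos:i] with 0 ≤ last_pos ≤ i is (drop last_pos).take (i - last_pos)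
def aLoop (cs : List Char) (i : Nat) (ret : List (String × Int)) (s l d : Int)
    (lastT : PyTok) (lastPos : Nat) :
    List (String × Int) × Int × Int × Int × PyTok × Nat :=
  if h : i < cs.length then
    if lastT ≠ pvGetType cs[i] then
      match lastT with
      | .digit =>
        aLoop cs (i+1)
          (ret ++ [(String.mk ((cs.drop lastPos).take (i - lastPos)), s)]
               ++ [(String.mk ((cs.drop lastPos).take (i - lastPos)), d)])
          (s+1) l (d+1) (pvGetType cs[i]) i
      | .letter =>
        aLoop cs (i+1)
          (ret ++ [(String.mk ((cs.drop lastPos).take (i - lastPos)), s)]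
               ++ [(String.mk ((cs.drop lastPos).take (i - lastPos)), l)])
          (s+1) (l+1) d (pvGetType cs[i]) i
      | .other =>
        aLoop cs (i+1)
          (ret ++ [(String.mk ((cs.drop lastPos).take (i - lastPos)), s)])
          (s+1) l d (pvGetType cs[i]) i
    else aLoop cs (i+1) ret s l d lastT lastPos
  else (ret, s, l, d, lastT, lastPos)
termination_by cs.length - i
decreasing_by all_goals omega

-- A's epilogue after the loop (the final 'if last_pos != 0' block)
def aFinish (cs : List Char) (st : List (String × Int) × Int × Int × Int × PyTok × Nat) :
    List (String × Int) :=
  match st with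
  | (ret, s, l, d, lastT, lastPos) =>
    if lastPos ≠ 0 then
      match lastT with
      | .digit => ret ++ [(String.mk (cs.drop lastPos), s)] ++ [(String.mk (cs.drop lastPos), d)]
      | .letter => ret ++ [(String.mk (cs.drop lastPos), s)] ++ [(String.mk (cs.drop lastPos), l)]
      | .other => ret ++ [(String.mk (cs.drop lastPos), s)]
    else ret

def account_transform (account : String) : List (String × Int) :=
  if account = "" then []
  else
    let cs := account.toList
    aFinish cs (aLoop cs 1 [(account, 4000)] 4001 4100 4200 (pvGetType cs[0]!) 0)

-- ===== PORT B =====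
-- phase 1 inner while: extend the current run while the next char has the same type
def pvTakeRun (t : PyTok) (run : List Char) (rest : List Char) : List Char × List Char :=
  match rest with
  | [] => (run, [])
  | c :: rs => if pvGetType c = t then pvTakeRun t (run ++ [c]) rs else (run, c :: rs)

theorem pvTakeRun_snd_length (t : PyTok) (run rest : List Char) :
    (pvTakeRun t run rest).2.length ≤ rest.length := by
  induction rest generalizing run with
  | nil => simp [pvTakeRun]
  | cons c rs ih =>
    simp only [pvTakeRun]
    split
    · exact le_trans (ih _) (by simp)
    · simp

-- phase 1 outer while: the list of maximal same-type runs
def pvRunsB (rest : List Char) : List (List Char × PyTok) :=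
  match rest with
  | [] => []
  | c :: rs =>
    ((pvTakeRun (pvGetType c) [c] rs).1, pvGetType c) ::
      pvRunsB (pvTakeRun (pvGetType c) [c] rs).2
termination_by rest.length
decreasing_by exact Nat.lt_succ_of_le (pvTakeRun_snd_length _ _ _)

-- phase 2: one loop over the runs with the three counters
def pvEmit : List (List Char × PyTok) → Int → Int → Int → List (String × Int)
  | [], _, _, _ => []
  | (txt, t) :: rs, s, l, d =>
    (String.mk txt, s) ::
      (match t with
       | .digit => (String.mk txt, d) :: pvEmit rs (s+1) l (d+1)
       | .letter => (String.mk txt, l) :: pvEmit rs (s+1) (l+1) d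
       | .other => pvEmit rs (s+1) l d)

def account_transform_alt (account : String) : List (String × Int) :=
  if account = "" then []
  else
    let runs := pvRunsB account.toList
    (account, 4000) :: (if 1 < runs.length then pvEmit runs 4001 4100 4200 else [])

-- ===== PRECONDITION & SPEC =====
def Spec_account_transform (account : String) (out : List (String × Int)) : Prop := out = account_transform_alt account
instance (account : String) (out : List (String × Int)) : Decidable (Spec_account_transform account out) := by unfold Spec_account_transform; infer_instance

-- ===== CLAIM (what is proved, stated in full; the proofs are below) =====
def Claim_equal_account_transform : Prop := ∀ (account : String), Dom_account_transform account → Spec_account_transform account (account_transform account)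

-- ===== LEMMAS AND PROOFS =====

-- the pairs A and B emit, seen from the current pending run and the remaining input;
-- `first` records whether the pending run started at position 0 (A's last_pos == 0)
def emitA : List Char → PyTok → List Char → Int → Int → Int → Bool → List (String × Int)
  | pending, t, [], s, l, d, first =>
    if first then []
    else
      (String.mk pending, s) ::
        (match t with
         | .digit => [(String.mk pending, d)]
         | .letter => [(String.mk pending, l)]
         | .other => [])
  | pending, t, c :: rs, s, l, d, first =>
    if pvGetType c = t then emitA (pending ++ [c]) t rs s l d first
    else
      ((String.mk pending, s) ::
        (match t with
         | .digit => [(String.mk pending, d)]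
         | .letter => [(String.mk pending, l)]
         | .other => [])) ++
      emitA [c] (pvGetType c) rs (s+1)
        (if t = .letter then l+1 else l) (if t = .digit then d+1 else d) false

theorem emitA_nil (pending : List Char) (t : PyTok) (s l d : Int) (first : Bool) :
    emitA pending t [] s l d first =
      (if first then []
       else
        (String.mk pending, s) ::
          (match t with
           | .digit => [(String.mk pending, d)]
           | .letter => [(String.mk pending, l)]
           | .other => [])) := rfl

theorem emitA_cons (pending : List Char) (t : PyTok) (c : Char) (rs : List Char)
    (s l d : Int) (first : Bool) :
    emitA pending t (c :: rs) s l d first =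
      (if pvGetType c = t then emitA (pending ++ [c]) t rs s l d first
       else
        ((String.mk pending, s) ::
          (match t with
           | .digit => [(String.mk pending, d)]
           | .letter => [(String.mk pending, l)]
           | .other => [])) ++
        emitA [c] (pvGetType c) rs (s+1)
          (if t = .letter then l+1 else l) (if t = .digit then d+1 else d) false) := rfl

theorem aLoop_emitA (cs : List Char) :
    ∀ n i ret s l d t lastPos, cs.length - i = n → 1 ≤ i → lastPos ≤ i → i ≤ cs.length →
      aFinish cs (aLoop cs i ret s l d t lastPos) =
        ret ++ emitA ((cs.drop lastPos).take (i - lastPos)) t (cs.drop i) s l d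
          (decide (lastPos = 0)) := by
  intro n
  induction n with
  | zero =>
    intro i ret s l d t lastPos hn h1 hlp hle
    have hi : i = cs.length := by omega
    rw [aLoop]
    simp only [dif_neg (by omega : ¬ i < cs.length)]
    have hdrop : cs.drop i = [] := List.drop_eq_nil_of_le (by omega)
    have hpend : (cs.drop lastPos).take (i - lastPos) = cs.drop lastPos := by
      apply List.take_of_length_le; simp; omega
    rw [hdrop, hpend]
    by_cases h0 : lastPos = 0
    · simp [aFinish, emitA_nil, h0]
    · cases t <;> simp [aFinish, emitA_nil, h0]
  | succ n ih =>
    intro i ret s l d t lastPos hn h1 hlp hle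
    have hi : i < cs.length := by omega
    have hdropi : cs.drop i = cs[i] :: cs.drop (i+1) := List.drop_eq_getElem_cons hi
    rw [aLoop]
    simp only [dif_pos hi]
    by_cases heq : t = pvGetType cs[i]
    · -- same type: extend the pending run
      rw [if_neg (not_ne_iff.mpr heq)]
      rw [ih (i+1) ret s l d t lastPos (by omega) (by omega) (by omega) (by omega)]
      have hpend : (cs.drop lastPos).take (i + 1 - lastPos)
          = (cs.drop lastPos).take (i - lastPos) ++ [cs[i]] := by
        have h2 : i + 1 - lastPos = (i - lastPos) + 1 := by omega
        rw [h2, List.take_succ]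
        have : (cs.drop lastPos)[i - lastPos]? = some cs[i] := by
          rw [List.getElem?_drop]
          have : lastPos + (i - lastPos) = i := by omega
          rw [this]
          exact List.getElem?_eq_getElem hi
        simp [this]
      rw [hpend, hdropi, emitA_cons, if_pos heq.symm]
    · -- type break: emit the pending run, restart at i
      rw [if_pos heq]
      have hnew : (cs.drop i).take (i + 1 - i) = [cs[i]] := by
        have h2 : i + 1 - i = 1 := by omega
        rw [h2, hdropi]
        rfl
      have hrec : ∀ ret' s' l' d',
          aFinish cs (aLoop cs (i+1) ret' s' l' d' (pvGetType cs[i]) i)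
            = ret' ++ emitA [cs[i]] (pvGetType cs[i]) (cs.drop (i+1)) s' l' d' false := by
        intro ret' s' l' d'
        rw [ih (i+1) ret' s' l' d' (pvGetType cs[i]) i (by omega) (by omega) (by omega) (by omega)]
        rw [hnew]
        simp [show ¬ i = 0 by omega]
      rw [hdropi, emitA_cons]
      rw [if_neg (show ¬ pvGetType cs[i] = t from fun h => heq h.symm)]
      cases t with
      | digit => rw [hrec]; simp
      | letter => rw [hrec]; simp
      | other => rw [hrec]; simp

theorem emitA_false (rest : List Char) :
    ∀ pending t s l d,
      emitA pending t rest s l d false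
        = pvEmit (((pvTakeRun t pending rest).1, t) :: pvRunsB (pvTakeRun t pending rest).2)
            s l d := by
  induction rest with
  | nil =>
    intro pending t s l d
    cases t <;> simp [emitA_nil, pvTakeRun, pvRunsB, pvEmit]
  | cons c rs ih =>
    intro pending t s l d
    rw [emitA_cons, pvTakeRun]
    by_cases h : pvGetType c = t
    · simp only [if_pos h]
      exact ih _ _ _ _ _
    · simp only [if_neg h]
      rw [pvRunsB]
      cases t <;> simp [pvEmit, ih]

theorem emitA_true (rest : List Char) :
    ∀ pending t s l d,
      emitA pending t rest s l d true
        = if (pvTakeRun t pending rest).2 = [] then []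
          else pvEmit (((pvTakeRun t pending rest).1, t) :: pvRunsB (pvTakeRun t pending rest).2)
            s l d := by
  induction rest with
  | nil =>
    intro pending t s l d
    simp [emitA_nil, pvTakeRun]
  | cons c rs ih =>
    intro pending t s l d
    rw [emitA_cons, pvTakeRun]
    by_cases h : pvGetType c = t
    · simp only [if_pos h]
      exact ih _ _ _ _ _
    · simp only [if_neg h]
      rw [pvRunsB]
      simp only [List.cons_ne_nil]
      cases t <;> simp [pvEmit, emitA_false]

theorem pvRunsB_eq_nil_iff (xs : List Char) : pvRunsB xs = [] ↔ xs = [] := by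
  cases xs <;> simp [pvRunsB]

-- ===== VERDICT (by name: the statement is the Claim_ definition above) =====
theorem account_transform_spec : Claim_equal_account_transform := by
  intro account _
  unfold Spec_account_transform account_transform account_transform_alt
  by_cases hemp : account = ""
  · simp [hemp]
  · simp only [if_neg hemp]
    have hne : account.toList ≠ [] := fun h => hemp (String.toList_eq_nil_iff.mp h)
    obtain ⟨c, rs, hcs⟩ : ∃ c rs, account.toList = c :: rs := by
      cases h : account.toList with
      | nil => exact absurd h hne
      | cons c rs => exact ⟨c, rs, rfl⟩
    have hlen : 1 ≤ account.toList.length := by rw [hcs]; simp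
    rw [aLoop_emitA account.toList (account.toList.length - 1) 1 _ _ _ _ _ 0 rfl le_rfl
      (by omega) hlen]
    rw [hcs]
    simp only [List.drop_zero, List.take_succ_cons, List.take_zero, List.drop_succ_cons,
      decide_true, List.getElem!_cons_zero]
    rw [emitA_true]
    rw [show pvRunsB (c :: rs)
        = ((pvTakeRun (pvGetType c) [c] rs).1, pvGetType c) ::
            pvRunsB (pvTakeRun (pvGetType c) [c] rs).2 from by rw [pvRunsB]]
    by_cases h2 : (pvTakeRun (pvGetType c) [c] rs).2 = []
    · simp [h2, pvRunsB_eq_nil_iff]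
    · have hnn : pvRunsB (pvTakeRun (pvGetType c) [c] rs).2 ≠ [] := by
        simpa [pvRunsB_eq_nil_iff]
      have hpos : 1 < (((pvTakeRun (pvGetType c) [c] rs).1, pvGetType c) ::
          pvRunsB (pvTakeRun (pvGetType c) [c] rs).2).length := by
        have := List.length_pos_iff.mpr hnn
        simp only [List.length_cons]
        omega
      rw [if_neg h2, if_pos hpos]
      simp
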